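-- pv_equiv track=rewrite | github.com/i-pj/AOC | 2015/day20/main.py | sum_of_divisors
-- ===== SOURCE A (Python) =====
-- import math
--
-- def sum_of_divisors(n, max_visits, multiplier):
--     sum = 0
--     for i in range(1, int(math.sqrt(n)) + 1):
--         if n % i == 0:
--             if i <= max_visits:
--                 sum += i * multiplier
--             if n // i <= max_visits and i * i!= n:
--                 sum += n // i * multiplier
--     return sum
-- ===== SOURCE B (Python) =====
-- def sum_of_divisors(n, max_visits, multiplier):
--     total = 0
--     for d in range(1, min(n, max_visits) + 1):
--         if n % d == 0:
--             total += d * multiplier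
--     return total
-- ===== Notes on version B (the rewrite author's own statement) =====
-- stated objective: simpler
-- what changed: B replaces A's sqrt-bounded paired divisor enumeration (i and n//i with a perfect-square guard) by a single plain scan of candidate divisors d = 1 .. min(n, max_visits), adding d*multiplier whenever d divides n.
-- crash fix: On negative n A raises ValueError (math.sqrt domain error) while B's empty range makes it return 0. — e.g. on sum_of_divisors(-4, 5, 2): A raises ValueError, B returns 0
import Mathlib
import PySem

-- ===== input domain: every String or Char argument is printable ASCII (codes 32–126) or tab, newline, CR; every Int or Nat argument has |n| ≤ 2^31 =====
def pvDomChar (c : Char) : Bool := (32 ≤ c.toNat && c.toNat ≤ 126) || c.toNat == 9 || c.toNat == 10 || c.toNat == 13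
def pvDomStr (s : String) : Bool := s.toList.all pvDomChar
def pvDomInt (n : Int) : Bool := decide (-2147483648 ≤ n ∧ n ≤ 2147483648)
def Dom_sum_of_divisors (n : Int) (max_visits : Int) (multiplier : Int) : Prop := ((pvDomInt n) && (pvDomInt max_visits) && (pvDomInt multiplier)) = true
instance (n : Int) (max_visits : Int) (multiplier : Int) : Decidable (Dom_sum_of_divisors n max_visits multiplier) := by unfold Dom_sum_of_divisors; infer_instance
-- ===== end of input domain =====

-- B replaces A's sqrt-bounded paired divisor enumeration by a plain scan of d = 1..min(n, max_visits); objective: simpler.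


-- ===== PORT A =====
-- int(math.sqrt(n)) is ported as Nat.sqrt n.toNat: exact for the admitted inputs (0 ≤ n ≤ 2^31,
-- where the correctly-rounded double sqrt truncates to the integer square root); for n < 0 Python
-- raises ValueError, which Pre_ excludes.
def sum_of_divisors (n : Int) (max_visits : Int) (multiplier : Int) : Int :=
  (PySem.List.pyRange 1 ((Nat.sqrt n.toNat : Int) + 1)).foldl
    (fun sum i =>
      if PySem.Int.mod n i = 0 then
        let sum := if i ≤ max_visits then sum + i * multiplier else sum
        if PySem.Int.floordiv n i ≤ max_visits ∧ i * i ≠ n then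
          sum + PySem.Int.floordiv n i * multiplier
        else sum
      else sum) 0

-- ===== PORT B =====
def sum_of_divisors_alt (n : Int) (max_visits : Int) (multiplier : Int) : Int :=
  (PySem.List.pyRange 1 (min n max_visits + 1)).foldl
    (fun total d => if PySem.Int.mod n d = 0 then total + d * multiplier else total) 0

-- ===== PRECONDITION & SPEC =====
-- Pre_ excludes exactly n < 0, where Python A raises ValueError (math.sqrt domain error).
def Pre_sum_of_divisors (n : Int) (max_visits : Int) (multiplier : Int) : Prop := 0 ≤ n
instance (n : Int) (max_visits : Int) (multiplier : Int) : Decidable (Pre_sum_of_divisors n max_visits multiplier) := by unfold Pre_sum_of_divisors; infer_instance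
def pvWitness_sum_of_divisors : Int × Int × Int := (12, 4, 2)

-- On negative n A raises ValueError (math.sqrt domain error) while B's empty range makes it return 0.
def Raises_sum_of_divisors (n : Int) (max_visits : Int) (multiplier : Int) : Prop := n < 0
instance (n : Int) (max_visits : Int) (multiplier : Int) : Decidable (Raises_sum_of_divisors n max_visits multiplier) := by unfold Raises_sum_of_divisors; infer_instance
def pvRaiseWitness_sum_of_divisors : Int × Int × Int := (-4, 5, 2)
def pvRaiseWitnessOut_sum_of_divisors : Int := 0

def Spec_sum_of_divisors (n : Int) (max_visits : Int) (multiplier : Int) (out : Int) : Prop := out = sum_of_divisors_alt n max_visits multiplier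
instance (n : Int) (max_visits : Int) (multiplier : Int) (out : Int) : Decidable (Spec_sum_of_divisors n max_visits multiplier out) := by unfold Spec_sum_of_divisors; infer_instance

-- ===== CLAIM (what is proved, stated in full; the proofs are below) =====
def Claim_equal_sum_of_divisors : Prop := ∀ (n : Int) (max_visits : Int) (multiplier : Int), Dom_sum_of_divisors n max_visits multiplier → Pre_sum_of_divisors n max_visits multiplier → Spec_sum_of_divisors n max_visits multiplier (sum_of_divisors n max_visits multiplier)
def Claim_raises_sum_of_divisors : Prop := (∀ (n : Int) (max_visits : Int) (multiplier : Int), Dom_sum_of_divisors n max_visits multiplier → Raises_sum_of_divisors n max_visits multiplier → ¬ Pre_sum_of_divisors n max_visits multiplier) ∧ (Dom_sum_of_divisors (pvRaiseWitness_sum_of_divisors.1) (pvRaiseWitness_sum_of_divisors.2.1) (pvRaiseWitness_sum_of_divisors.2.2) ∧ Raises_sum_of_divisors (pvRaiseWitness_sum_of_divisors.1) (pvRaiseWitness_sum_of_divisors.2.1) (pvRaiseWitness_sum_of_divisors.2.2) ∧ sum_of_divisors_alt (pvRaiseWitness_sum_of_divisors.1) (pvRaiseWitness_sum_of_divisors.2.1)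 (pvRaiseWitness_sum_of_divisors.2.2) = pvRaiseWitnessOut_sum_of_divisors)

-- ===== LEMMAS AND PROOFS =====

-- g d = the contribution of a candidate divisor d (the "≤ max_visits then d·multiplier" term)
def pvG (mv mult : Int) (d : Nat) : Int := if (d : Int) ≤ mv then (d : Int) * mult else 0

-- a foldl that only ever adds is the sum of a map
theorem pv_sum_pyRange (m : Nat) (h : Int → Int) :
    ((PySem.List.pyRange 1 ((m : Int) + 1)).map h).sum = ∑ i ∈ Finset.Icc 1 m, h (i : Int) := by
  induction m with
  | zero => simp [PySem.List.pyRange_one_eq_nil (by norm_num : (1:Int) ≤ 1)]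
  | succ k ih =>
      rw [show ((k+1 : Nat) : Int) + 1 = ((k : Int) + 1) + 1 by push_cast; ring,
        PySem.List.pyRange_one_succ_right (by omega), Finset.sum_Icc_succ_top (by omega)]
      simp [ih]

-- the pairing identity: summing g over all divisors of N equals A's paired enumeration up to √N
theorem pv_pair_sum (N : Nat) (hN : 0 < N) (g : Nat → Int) :
    ∑ d ∈ (Finset.Icc 1 N).filter (· ∣ N), g d
      = ∑ i ∈ (Finset.Icc 1 (Nat.sqrt N)).filter (· ∣ N),
          (g i + if i * i ≠ N then g (N / i) else 0) := by
  set s := Nat.sqrt N with hs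
  have hsum2 : ∀ F : Finset Nat, ∑ i ∈ F, (g i + if i * i ≠ N then g (N / i) else 0)
      = ∑ i ∈ F, g i + ∑ i ∈ F.filter (fun i => i * i ≠ N), g (N / i) := by
    intro F; rw [Finset.sum_add_distrib, Finset.sum_filter]
  rw [hsum2]
  have hset : ((Finset.Icc 1 N).filter (· ∣ N)).filter (· ≤ s)
      = (Finset.Icc 1 s).filter (· ∣ N) := by
    ext d
    simp only [Finset.mem_filter, Finset.mem_Icc]
    constructor
    · rintro ⟨⟨⟨h1, _⟩, hd⟩, hle⟩; exact ⟨⟨h1, hle⟩, hd⟩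
    · rintro ⟨⟨h1, hle⟩, hd⟩
      exact ⟨⟨⟨h1, Nat.le_of_dvd hN hd⟩, hd⟩, hle⟩
  rw [← Finset.sum_filter_add_sum_filter_not ((Finset.Icc 1 N).filter (· ∣ N)) (· ≤ s) g, hset]
  congr 1
  -- the large divisors are in bijection (d ↦ N/d) with the small non-square-root divisors
  refine Finset.sum_nbij' (fun d => N / d) (fun i => N / i) ?_ ?_ ?_ ?_ ?_
  · intro d hd
    simp only [Finset.mem_filter, Finset.mem_Icc, not_le] at hd ⊢
    obtain ⟨⟨⟨h1, h2⟩, hdvd⟩, hgt⟩ := hd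
    have hdd : N / d ∣ N := Nat.div_dvd_of_dvd hdvd
    have hpos : 0 < N / d := Nat.div_pos h2 (by omega)
    have hmul : N / d * d = N := Nat.div_mul_cancel hdvd
    have hle : N / d ≤ s := by
      by_contra hc
      have h1' : s + 1 ≤ N / d := by omega
      have h2' : (s+1) * (s+1) ≤ (N/d) * d := Nat.mul_le_mul h1' (by omega)
      have hlt := Nat.lt_succ_sqrt N
      rw [Nat.succ_eq_add_one, ← hs] at hlt
      omega
    refine ⟨⟨⟨hpos, hle⟩, hdd⟩, ?_⟩
    intro hsq
    have : N / d * (N / d) = N / d * d := by omega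
    have : N / d = d := Nat.eq_of_mul_eq_mul_left hpos this
    omega
  · intro i hi
    simp only [Finset.mem_filter, Finset.mem_Icc, not_le] at hi ⊢
    obtain ⟨⟨⟨h1, hle⟩, hdvd⟩, hsq⟩ := hi
    have hdd : N / i ∣ N := Nat.div_dvd_of_dvd hdvd
    have hmul : N / i * i = N := Nat.div_mul_cancel hdvd
    have hpos : 0 < N / i := Nat.div_pos (Nat.le_of_dvd hN hdvd) (by omega)
    refine ⟨⟨⟨hpos, Nat.le_of_dvd hN hdd⟩, hdd⟩, ?_⟩
    by_contra hc
    have h2 : N / i ≤ s := by omega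
    have hN2 : N ≤ s * s := by
      calc N = N / i * i := hmul.symm
        _ ≤ s * s := Nat.mul_le_mul h2 hle
    have hs2 : s * s ≤ N := by rw [hs]; exact Nat.sqrt_le N
    have hNs : N = s * s := le_antisymm hN2 hs2
    have hie : i = s := by nlinarith [hmul, hle, h2, hpos, h1]
    exact hsq (by rw [hie, ← hNs])
  · intro d hd
    simp only [Finset.mem_filter, Finset.mem_Icc] at hd
    exact Nat.div_div_self hd.1.2 (by omega)
  · intro i hi
    simp only [Finset.mem_filter, Finset.mem_Icc] at hi
    exact Nat.div_div_self hi.1.2 (by omega)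
  · intro d hd
    simp only [Finset.mem_filter, Finset.mem_Icc] at hd
    rw [Nat.div_div_self hd.1.2 (by omega)]

-- port A, for positive n, computes the g-sum over all divisors of N
theorem pv_A_eq (n mv mult : Int) (N : Nat) (hn : n = (N : Int)) (hN : 0 < N) :
    sum_of_divisors n mv mult = ∑ d ∈ (Finset.Icc 1 N).filter (· ∣ N), pvG mv mult d := by
  subst hn
  unfold sum_of_divisors
  have hb : (fun (sum : Int) (i : Int) =>
      if PySem.Int.mod (N : Int) i = 0 then
        let sum := if i ≤ mv then sum + i * mult else sum
        if PySem.Int.floordiv (N : Int) i ≤ mv ∧ i * i ≠ (N : Int) then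
          sum + PySem.Int.floordiv (N : Int) i * mult
        else sum
      else sum)
      = fun sum i => sum +
        (if PySem.Int.mod (N : Int) i = 0 then
          ((if i ≤ mv then i * mult else 0) +
           (if PySem.Int.floordiv (N : Int) i ≤ mv ∧ i * i ≠ (N : Int) then
              PySem.Int.floordiv (N : Int) i * mult else 0))
         else 0) := by
    funext sum i
    dsimp only
    split_ifs <;> ring
  rw [show ((N : Int).toNat) = N from Int.toNat_natCast N, hb, PySem.List.foldl_add,
    pv_sum_pyRange, zero_add, pv_pair_sum N hN (pvG mv mult), Finset.sum_filter]
  refine Finset.sum_congr rfl ?_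
  intro i hi
  rw [Finset.mem_Icc] at hi
  rw [PySem.Int.mod_natCast, PySem.Int.floordiv_natCast]
  have hdvd : (((N % i : Nat) : Int) = 0) ↔ i ∣ N := by
    rw [Nat.cast_eq_zero]
    exact Nat.dvd_iff_mod_eq_zero.symm
  have hsq : (((i : Int)) * (i : Int) ≠ (N : Int)) ↔ i * i ≠ N := by
    constructor <;> intro h h2 <;> apply h <;> exact_mod_cast h2
  by_cases hd : i ∣ N
  · rw [if_pos (hdvd.mpr hd), if_pos hd]
    by_cases h2 : i * i ≠ N
    · rw [if_pos h2]
      have hcond : ((((N / i : Nat) : Int) ≤ mv ∧ (i : Int) * (i : Int) ≠ (N : Int)) ↔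
          (((N / i : Nat) : Int) ≤ mv)) := and_iff_left (hsq.mpr h2)
      rw [if_congr hcond rfl rfl]
      unfold pvG
      ring
    · rw [if_neg h2]
      have hcond : ¬(((N / i : Nat) : Int) ≤ mv ∧ (i : Int) * (i : Int) ≠ (N : Int)) :=
        fun h => h.2 (by exact_mod_cast congrArg (Nat.cast : Nat → Int) (not_not.mp h2))
      rw [if_neg hcond]
      unfold pvG
      ring
  · rw [if_neg (fun h => hd (hdvd.mp h)), if_neg hd]

-- port B, for positive n, computes the same g-sum over all divisors of N
theorem pv_B_eq (n mv mult : Int) (N : Nat) (hn : n = (N : Int)) (hN : 0 < N) :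
    sum_of_divisors_alt n mv mult = ∑ d ∈ (Finset.Icc 1 N).filter (· ∣ N), pvG mv mult d := by
  subst hn
  unfold sum_of_divisors_alt
  rcases lt_or_ge (min (N : Int) mv) 0 with hneg | hpos
  · rw [PySem.List.pyRange_one_eq_nil (by omega)]
    simp only [List.foldl_nil]
    symm
    refine Finset.sum_eq_zero ?_
    intro d hd
    rw [Finset.mem_filter, Finset.mem_Icc] at hd
    unfold pvG
    rw [if_neg (by
      have h3 := min_choice ((N : Int)) mv
      have h2 : (1 : Int) ≤ (d : Int) := by exact_mod_cast hd.1.1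
      rcases h3 with h3 | h3 <;> omega)]
  · set M : Nat := (min (N : Int) mv).toNat with hM
    have hMe : (M : Int) = min (N : Int) mv := Int.toNat_of_nonneg hpos
    have hMN : M ≤ N := by
      have h := min_le_left (N : Int) mv
      omega
    have hMv : (M : Int) ≤ mv := by
      have h := min_le_right (N : Int) mv
      omega
    have hb : (fun (total : Int) (d : Int) =>
        if PySem.Int.mod (N : Int) d = 0 then total + d * mult else total)
        = fun total d => total + (if PySem.Int.mod (N : Int) d = 0 then d * mult else 0) := by
      funext total d
      split_ifs <;> ring
    rw [show min (N : Int) mv + 1 = (M : Int) + 1 by omega, hb, PySem.List.foldl_add,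
      pv_sum_pyRange, zero_add]
    have lhs_eq : ∑ d ∈ Finset.Icc 1 M,
        (if PySem.Int.mod (N : Int) (d : Int) = 0 then (d : Int) * mult else 0)
        = ∑ d ∈ (Finset.Icc 1 M).filter (· ∣ N), (d : Int) * mult := by
      rw [Finset.sum_filter]
      refine Finset.sum_congr rfl ?_
      intro d hd
      rw [Finset.mem_Icc] at hd
      rw [PySem.Int.mod_natCast]
      by_cases h : d ∣ N
      · rw [if_pos (by exact_mod_cast Nat.dvd_iff_mod_eq_zero.mp h), if_pos h]
      · rw [if_neg (fun hc => h (Nat.dvd_iff_mod_eq_zero.mpr (by exact_mod_cast hc))), if_neg h]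
    rw [lhs_eq]
    have hsets : (Finset.Icc 1 M).filter (· ∣ N) = ((Finset.Icc 1 N).filter (· ∣ N)).filter (· ≤ M) := by
      ext d
      simp only [Finset.mem_filter, Finset.mem_Icc]
      constructor
      · rintro ⟨⟨h1, h2⟩, h3⟩
        exact ⟨⟨⟨h1, le_trans h2 hMN⟩, h3⟩, h2⟩
      · rintro ⟨⟨⟨h1, _⟩, h3⟩, h4⟩
        exact ⟨⟨h1, h4⟩, h3⟩
    have h1 : ∑ d ∈ ((Finset.Icc 1 N).filter (· ∣ N)).filter (· ≤ M), pvG mv mult d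
        = ∑ d ∈ ((Finset.Icc 1 N).filter (· ∣ N)).filter (· ≤ M), (d : Int) * mult := by
      refine Finset.sum_congr rfl ?_
      intro d hd
      simp only [Finset.mem_filter, Finset.mem_Icc] at hd
      unfold pvG
      rw [if_pos (by have h5 : (d : Int) ≤ (M : Int) := (by exact_mod_cast hd.2); omega)]
    have h2 : ∑ d ∈ ((Finset.Icc 1 N).filter (· ∣ N)).filter (fun d => ¬ d ≤ M), pvG mv mult d = 0 := by
      refine Finset.sum_eq_zero ?_
      intro d hd
      simp only [Finset.mem_filter, Finset.mem_Icc] at hd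
      have hcond : ¬ (d : Int) ≤ mv := by
        intro hdmv
        have hdN : (d : Int) ≤ (N : Int) := by exact_mod_cast hd.1.1.2
        have h4 : (d : Int) ≤ (M : Int) := by rw [hMe]; exact le_min hdN hdmv
        exact hd.2 (by exact_mod_cast h4)
      unfold pvG
      rw [if_neg hcond]
    rw [hsets, ← Finset.sum_filter_add_sum_filter_not ((Finset.Icc 1 N).filter (· ∣ N)) (· ≤ M) (pvG mv mult), h1, h2, add_zero]

-- ===== VERDICT (by name: the statement is the Claim_ definition above) =====
theorem sum_of_divisors_spec : Claim_equal_sum_of_divisors := by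
  unfold Claim_equal_sum_of_divisors
  intro n mv mult _ hpre
  unfold Pre_sum_of_divisors at hpre
  unfold Spec_sum_of_divisors
  obtain ⟨N, hn⟩ : ∃ N : Nat, n = (N : Int) := ⟨n.toNat, by omega⟩
  rcases Nat.eq_zero_or_pos N with h0 | hposN
  · subst h0
    rw [hn]
    unfold sum_of_divisors sum_of_divisors_alt
    rw [PySem.List.pyRange_one_eq_nil (by simp [Nat.sqrt]),
      PySem.List.pyRange_one_eq_nil (by have := min_le_left ((0:Nat) : Int) mv; omega)]
    rfl
  · rw [pv_A_eq n mv mult N hn hposN, pv_B_eq n mv mult N hn hposN]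

@[simp] theorem sum_of_divisors_raises : Claim_raises_sum_of_divisors := by
  unfold Claim_raises_sum_of_divisors
  exact ⟨fun n mv mult _ h hp => by exact absurd hp (by unfold Pre_sum_of_divisors Raises_sum_of_divisors at *; omega), by decide⟩
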